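-- pv_equiv track=rewrite | github.com/manuelafba/programacao-I | 1ª avaliação/lista 1 contagem/ex09.py | classfifcar_softwares
-- ===== SOURCE A (Python) =====
-- def classfifcar_softwares(lista_vulnerabilidade):
--     classes = {
--         "Muito seguro": 0,
--         "Quase seguro": 0,
--         "Inseguro": 0,
--         "Muito inseguro": 0
--     }
--
--     for vulnerabilidade in lista_vulnerabilidade:
--         if vulnerabilidade == 0:
--             classes["Muito seguro"] += 1
--         elif 1 <= vulnerabilidade <= 3:
--             classes["Quase seguro"] += 1
--         elif 4 <= vulnerabilidade <= 5:
--             classes["Inseguro"] += 1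
--         else:
--             classes["Muito inseguro"] += 1
--
--     return classes
-- ===== SOURCE B (Python) =====
-- def classfifcar_softwares(lista_vulnerabilidade):
--     return {
--         "Muito seguro": sum(1 for v in lista_vulnerabilidade if v == 0),
--         "Quase seguro": sum(1 for v in lista_vulnerabilidade if 1 <= v <= 3),
--         "Inseguro": sum(1 for v in lista_vulnerabilidade if 4 <= v <= 5),
--         "Muito inseguro": sum(1 for v in lista_vulnerabilidade
--                               if not (v == 0 or 1 <= v <= 3 or 4 <= v <= 5)),
--     }
-- ===== Notes on version B (the rewrite author's own statement) =====
-- stated objective: alternative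
-- what changed: Replaces the single elif-chain loop that increments counters in one mutable dict with a dict literal whose four entries are computed by four independent counting scans of the list.
import Mathlib
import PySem

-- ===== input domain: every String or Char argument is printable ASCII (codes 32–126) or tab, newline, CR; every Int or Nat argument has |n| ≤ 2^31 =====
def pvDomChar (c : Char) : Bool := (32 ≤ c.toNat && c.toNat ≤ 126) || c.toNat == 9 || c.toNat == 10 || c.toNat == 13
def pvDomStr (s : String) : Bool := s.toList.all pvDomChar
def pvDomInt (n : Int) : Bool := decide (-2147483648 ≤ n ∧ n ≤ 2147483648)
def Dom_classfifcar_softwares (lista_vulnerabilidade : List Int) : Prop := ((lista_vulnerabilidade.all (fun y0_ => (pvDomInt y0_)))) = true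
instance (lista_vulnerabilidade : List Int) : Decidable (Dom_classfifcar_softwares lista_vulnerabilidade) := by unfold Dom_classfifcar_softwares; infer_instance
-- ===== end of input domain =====

-- B builds the four-entry dict with four independent counting scans instead of A's single elif-chain loop over one mutable dict; objective: alternative decomposition.

-- ===== PORT A =====
def classfifcar_softwares (lista_vulnerabilidade : List Int) : List (String × Int) :=
  (lista_vulnerabilidade.foldl (fun classes v =>
      if v = 0 then classes.modify "Muito seguro" 0 (· + 1)
      else if 1 ≤ v ∧ v ≤ 3 then classes.modify "Quase seguro" 0 (· + 1)
      else if 4 ≤ v ∧ v ≤ 5 then classes.modify "Inseguro" 0 (· + 1)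
      else classes.modify "Muito inseguro" 0 (· + 1))
    (PySem.Dict.ofList [("Muito seguro", 0), ("Quase seguro", 0), ("Inseguro", 0), ("Muito inseguro", 0)])).items

-- ===== PORT B =====
def classfifcar_softwares_alt (lista_vulnerabilidade : List Int) : List (String × Int) :=
  [ ("Muito seguro", ((lista_vulnerabilidade.countP (fun v => v = 0) : Nat) : Int)),
    ("Quase seguro", ((lista_vulnerabilidade.countP (fun v => 1 ≤ v ∧ v ≤ 3) : Nat) : Int)),
    ("Inseguro", ((lista_vulnerabilidade.countP (fun v => 4 ≤ v ∧ v ≤ 5) : Nat) : Int)),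
    ("Muito inseguro", ((lista_vulnerabilidade.countP
        (fun v => ¬(v = 0 ∨ (1 ≤ v ∧ v ≤ 3) ∨ (4 ≤ v ∧ v ≤ 5))) : Nat) : Int)) ]

-- ===== PRECONDITION & SPEC =====
def Spec_classfifcar_softwares (lista_vulnerabilidade : List Int) (out : List (String × Int)) : Prop := out = classfifcar_softwares_alt lista_vulnerabilidade
instance (lista_vulnerabilidade : List Int) (out : List (String × Int)) : Decidable (Spec_classfifcar_softwares lista_vulnerabilidade out) := by unfold Spec_classfifcar_softwares; infer_instance

-- ===== CLAIM (what is proved, stated in full; the proofs are below) =====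
def Claim_equal_classfifcar_softwares : Prop := ∀ (lista_vulnerabilidade : List Int), Dom_classfifcar_softwares lista_vulnerabilidade → Spec_classfifcar_softwares lista_vulnerabilidade (classfifcar_softwares lista_vulnerabilidade)

-- ===== LEMMAS AND PROOFS =====

-- Invariant of A's loop: starting from the four-entry dict with values (a, b, c, d),
-- folding over l adds the four class counts to the respective entries.
lemma fold_items (l : List Int) (a b c d : Int) :
    (l.foldl (fun classes v =>
        if v = 0 then classes.modify "Muito seguro" 0 (· + 1)
        else if 1 ≤ v ∧ v ≤ 3 then classes.modify "Quase seguro" 0 (· + 1)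
        else if 4 ≤ v ∧ v ≤ 5 then classes.modify "Inseguro" 0 (· + 1)
        else classes.modify "Muito inseguro" 0 (· + 1))
      (PySem.Dict.mk [("Muito seguro", a), ("Quase seguro", b), ("Inseguro", c), ("Muito inseguro", d)])).items =
    [ ("Muito seguro", a + ((l.countP (fun v => v = 0) : Nat) : Int)),
      ("Quase seguro", b + ((l.countP (fun v => 1 ≤ v ∧ v ≤ 3) : Nat) : Int)),
      ("Inseguro", c + ((l.countP (fun v => 4 ≤ v ∧ v ≤ 5) : Nat) : Int)),
      ("Muito inseguro", d + ((l.countP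
          (fun v => ¬(v = 0 ∨ (1 ≤ v ∧ v ≤ 3) ∨ (4 ≤ v ∧ v ≤ 5))) : Nat) : Int)) ] := by
  induction l generalizing a b c d with
  | nil => simp
  | cons x xs ih =>
    simp only [List.foldl_cons, List.countP_cons]
    by_cases h0 : x = 0
    · rw [if_pos h0,
        show (PySem.Dict.mk [("Muito seguro", a), ("Quase seguro", b), ("Inseguro", c), ("Muito inseguro", d)]).modify "Muito seguro" 0 (· + 1) = PySem.Dict.mk [("Muito seguro", a + 1), ("Quase seguro", b), ("Inseguro", c), ("Muito inseguro", d)] from rfl,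
        ih]
      simp [h0]; omega
    · rw [if_neg h0]
      by_cases h1 : 1 ≤ x ∧ x ≤ 3
      · rw [if_pos h1,
          show (PySem.Dict.mk [("Muito seguro", a), ("Quase seguro", b), ("Inseguro", c), ("Muito inseguro", d)]).modify "Quase seguro" 0 (· + 1) = PySem.Dict.mk [("Muito seguro", a), ("Quase seguro", b + 1), ("Inseguro", c), ("Muito inseguro", d)] from rfl,
          ih]
        simp [h0, h1]; omega
      · rw [if_neg h1]
        by_cases h2 : 4 ≤ x ∧ x ≤ 5
        · rw [if_pos h2,
            show (PySem.Dict.mk [("Muito seguro", a), ("Quase seguro", b), ("Inseguro", c), ("Muito inseguro", d)]).modify "Inseguro" 0 (· + 1) = PySem.Dict.mk [("Muito seguro", a), ("Quase seguro", b), ("Inseguro", c + 1), ("Muito inseguro", d)] from rfl,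
            ih]
          simp [h0, h1, h2]; omega
        · rw [if_neg h2,
            show (PySem.Dict.mk [("Muito seguro", a), ("Quase seguro", b), ("Inseguro", c), ("Muito inseguro", d)]).modify "Muito inseguro" 0 (· + 1) = PySem.Dict.mk [("Muito seguro", a), ("Quase seguro", b), ("Inseguro", c), ("Muito inseguro", d + 1)] from rfl,
            ih]
          simp [h0, h1, h2]; omega

-- ===== VERDICT (by name: the statement is the Claim_ definition above) =====
theorem classfifcar_softwares_spec : Claim_equal_classfifcar_softwares := by
  intro l _
  unfold Spec_classfifcar_softwares classfifcar_softwares classfifcar_softwares_alt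
  rw [show (PySem.Dict.ofList [("Muito seguro", (0:Int)), ("Quase seguro", 0), ("Inseguro", 0), ("Muito inseguro", 0)]) = PySem.Dict.mk [("Muito seguro", 0), ("Quase seguro", 0), ("Inseguro", 0), ("Muito inseguro", 0)] from rfl]
  rw [fold_items]
  simp
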